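-- pv_equiv track=rewrite | github.com/wardgeronimussmets/ML_gamebot | src/PlayerRecogniser.py | remove_pixel_from_map
-- ===== SOURCE A (Python) =====
-- def remove_pixel_from_map(map,pixel_value,pixel_value_range):
--     #remove keys from counting map
--     b,g,r = pixel_value
--     for bi in range(-pixel_value_range,pixel_value_range+1):
--         b_index = b + bi
--         for gi in range(-pixel_value_range,pixel_value_range+1):
--             g_index = g + gi
--             for ri in range(-pixel_value_range,pixel_value_range+1):
--                 r_index = r + ri
--
--                 key = (b_index,g_index,r_index)
--                 if key in map:
--                     del map[key]
--     return map
-- ===== SOURCE B (Python) =====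
-- def remove_pixel_from_map(map, pixel_value, pixel_value_range):
--     # Single pass over the stored keys instead of enumerating the whole cube.
--     b, g, r = pixel_value
--     to_remove = [k for k in map
--                  if abs(k[0] - b) <= pixel_value_range
--                  and abs(k[1] - g) <= pixel_value_range
--                  and abs(k[2] - r) <= pixel_value_range]
--     for k in to_remove:
--         del map[k]
--     return map
-- ===== Notes on version B (the rewrite author's own statement) =====
-- stated objective: faster
-- what changed: B scans the dict's stored keys once, collecting those within pixel_value_range of the pixel on all three channels, then deletes them; A enumerates every coordinate of the (2R+1)^3 cube and probes the dict for each.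
import Mathlib
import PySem

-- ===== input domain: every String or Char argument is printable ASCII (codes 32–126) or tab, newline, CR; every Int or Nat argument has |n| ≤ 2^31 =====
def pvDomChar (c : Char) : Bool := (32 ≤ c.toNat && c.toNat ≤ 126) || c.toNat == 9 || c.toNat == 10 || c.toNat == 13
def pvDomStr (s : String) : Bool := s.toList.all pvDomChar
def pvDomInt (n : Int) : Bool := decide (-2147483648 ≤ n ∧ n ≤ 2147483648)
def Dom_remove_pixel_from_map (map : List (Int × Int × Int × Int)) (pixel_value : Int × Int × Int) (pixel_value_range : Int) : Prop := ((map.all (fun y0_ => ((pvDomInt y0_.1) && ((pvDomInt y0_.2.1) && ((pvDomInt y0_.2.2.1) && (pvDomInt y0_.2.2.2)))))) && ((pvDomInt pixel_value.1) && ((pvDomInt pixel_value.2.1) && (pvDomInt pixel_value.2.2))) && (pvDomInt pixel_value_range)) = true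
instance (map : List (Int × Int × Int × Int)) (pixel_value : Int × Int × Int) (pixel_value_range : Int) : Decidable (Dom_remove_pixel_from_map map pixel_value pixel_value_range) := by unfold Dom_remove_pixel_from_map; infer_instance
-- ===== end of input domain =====

-- B replaces A's enumeration of the whole (2R+1)^3 color cube by one pass over the
-- dict's stored keys (collect keys within range on all three channels, then delete them);
-- equivalence is about the returned value (both Pythons mutate and return the same dict object).

-- ===== PORT A =====
-- the key of a stored dict entry (the dict (b,g,r) ↦ count is the association list of 4-tuples)
def pvKey (e : Int × Int × Int × Int) : Int × Int × Int := (e.1, e.2.1, e.2.2.1)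

-- 'key in map'
def pvContains (m : List (Int × Int × Int × Int)) (k : Int × Int × Int) : Bool :=
  m.any (fun e => pvKey e == k)

-- 'del map[key]': remove the first entry with key k (a Python dict holds at most one)
def pvDel (m : List (Int × Int × Int × Int)) (k : Int × Int × Int) : List (Int × Int × Int × Int) :=
  match m with
  | [] => []
  | e :: t => if pvKey e == k then t else e :: pvDel t k

def remove_pixel_from_map (map : List (Int × Int × Int × Int)) (pixel_value : Int × Int × Int) (pixel_value_range : Int) : List (Int × Int × Int × Int) :=
  let b := pixel_value.1
  let g := pixel_value.2.1
  let r := pixel_value.2.2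
  (PySem.List.pyRange (-pixel_value_range) (pixel_value_range + 1) 1).foldl (fun m bi =>
    let b_index := b + bi
    (PySem.List.pyRange (-pixel_value_range) (pixel_value_range + 1) 1).foldl (fun m gi =>
      let g_index := g + gi
      (PySem.List.pyRange (-pixel_value_range) (pixel_value_range + 1) 1).foldl (fun m ri =>
        let r_index := r + ri
        let key := (b_index, g_index, r_index)
        if pvContains m key then pvDel m key else m) m) m) map

-- ===== PORT B =====
def remove_pixel_from_map_alt (map : List (Int × Int × Int × Int)) (pixel_value : Int × Int × Int) (pixel_value_range : Int) : List (Int × Int × Int × Int) :=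
  let b := pixel_value.1
  let g := pixel_value.2.1
  let r := pixel_value.2.2
  let to_remove := (map.map pvKey).filter (fun k =>
    decide (|k.1 - b| ≤ pixel_value_range) &&
    decide (|k.2.1 - g| ≤ pixel_value_range) &&
    decide (|k.2.2 - r| ≤ pixel_value_range))
  to_remove.foldl (fun m k => pvDel m k) map

-- ===== PRECONDITION & SPEC =====
-- Pre_ only requires the association list to have pairwise-distinct keys: a Python dict
-- always has distinct keys, so this excludes no input the Python function can receive.
def Pre_remove_pixel_from_map (map : List (Int × Int × Int × Int)) (pixel_value : Int × Int × Int) (pixel_value_range : Int) : Prop :=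
  (map.map pvKey).Nodup
instance (map : List (Int × Int × Int × Int)) (pixel_value : Int × Int × Int) (pixel_value_range : Int) : Decidable (Pre_remove_pixel_from_map map pixel_value pixel_value_range) := by unfold Pre_remove_pixel_from_map; infer_instance

def pvWitness_remove_pixel_from_map : (List (Int × Int × Int × Int)) × (Int × Int × Int) × Int :=
  ([(0, 0, 0, 5), (9, 9, 9, 2)], (0, 0, 0), 1)

def Spec_remove_pixel_from_map (map : List (Int × Int × Int × Int)) (pixel_value : Int × Int × Int) (pixel_value_range : Int) (out : List (Int × Int × Int × Int)) : Prop := out = remove_pixel_from_map_alt map pixel_value pixel_value_range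
instance (map : List (Int × Int × Int × Int)) (pixel_value : Int × Int × Int) (pixel_value_range : Int) (out : List (Int × Int × Int × Int)) : Decidable (Spec_remove_pixel_from_map map pixel_value pixel_value_range out) := by unfold Spec_remove_pixel_from_map; infer_instance

-- ===== CLAIM (what is proved, stated in full; the proofs are below) =====
def Claim_equal_remove_pixel_from_map : Prop := ∀ (map : List (Int × Int × Int × Int)) (pixel_value : Int × Int × Int) (pixel_value_range : Int), Dom_remove_pixel_from_map map pixel_value pixel_value_range → Pre_remove_pixel_from_map map pixel_value pixel_value_range → Spec_remove_pixel_from_map map pixel_value pixel_value_range (remove_pixel_from_map map pixel_value pixel_value_range)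

-- ===== LEMMAS AND PROOFS =====

theorem pvDel_eq_filter (m : List (Int × Int × Int × Int)) (k : Int × Int × Int)
    (h : (m.map pvKey).Nodup) : pvDel m k = m.filter (fun e => !(pvKey e == k)) := by
  induction m with
  | nil => rfl
  | cons e t ih =>
    simp only [List.map_cons, List.nodup_cons] at h
    by_cases hk : pvKey e = k
    · simp only [pvDel, List.filter_cons, hk, beq_self_eq_true, if_true, Bool.not_true]
      have : t.filter (fun x => !(pvKey x == k)) = t := by
        apply List.filter_eq_self.2
        intro x hx
        have : pvKey x ≠ k := by
          intro hc
          exact h.1 (by rw [hk, ← hc]; exact List.mem_map_of_mem hx)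
        simp [this]
      simp [this]
    · simp only [pvDel, List.filter_cons]
      have hb : (pvKey e == k) = false := by simp [hk]
      simp [hb, ih h.2]

theorem pvStep_eq_filter (m : List (Int × Int × Int × Int)) (k : Int × Int × Int)
    (h : (m.map pvKey).Nodup) :
    (if pvContains m k then pvDel m k else m) = m.filter (fun e => !(pvKey e == k)) := by
  by_cases hc : pvContains m k = true
  · simp [hc, pvDel_eq_filter m k h]
  · simp only [Bool.not_eq_true] at hc
    rw [if_neg (by simp [hc])]
    symm
    apply List.filter_eq_self.2
    intro x hx
    have : ¬ (pvKey x == k) = true := by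
      intro hb
      have : pvContains m k = true := by
        unfold pvContains; exact List.any_eq_true.2 ⟨x, hx, hb⟩
      simp [this] at hc
    simp at this ⊢
    exact this

theorem pvNodup_filter (m : List (Int × Int × Int × Int)) (p : (Int × Int × Int × Int) → Bool)
    (h : (m.map pvKey).Nodup) : ((m.filter p).map pvKey).Nodup :=
  h.sublist (List.Sublist.map pvKey List.filter_sublist)

-- a fold whose body acts as a filter (on key-distinct lists) is the filter by the conjunction
theorem pvFoldl_filter_body {α : Type} (L : List α)
    (body : List (Int × Int × Int × Int) → α → List (Int × Int × Int × Int))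
    (P : α → (Int × Int × Int × Int) → Bool)
    (hb : ∀ m a, (m.map pvKey).Nodup → body m a = m.filter (P a)) :
    ∀ m : List (Int × Int × Int × Int), (m.map pvKey).Nodup →
      L.foldl body m = m.filter (fun e => L.all (fun a => P a e)) := by
  induction L with
  | nil => intro m _; simp
  | cons a L ih =>
    intro m h
    have h1 : body m a = m.filter (P a) := hb m a h
    have h2 : ((m.filter (P a)).map pvKey).Nodup := pvNodup_filter m (P a) h
    calc (a :: L).foldl body m = L.foldl body (m.filter (P a)) := by rw [List.foldl_cons, h1]
      _ = (m.filter (P a)).filter (fun e => L.all (fun x => P x e)) := ih _ h2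
      _ = m.filter (fun e => (a :: L).all (fun x => P x e)) := by
          rw [List.filter_filter]
          apply List.filter_congr
          intro x _
          simp [Bool.and_comm]

-- the cube membership test on a key, as B uses it
def pvCube (b g r R : Int) (k : Int × Int × Int) : Bool :=
  decide (|k.1 - b| ≤ R) && decide (|k.2.1 - g| ≤ R) && decide (|k.2.2 - r| ≤ R)

theorem pvA_eq_filter (map : List (Int × Int × Int × Int)) (pv : Int × Int × Int) (R : Int)
    (h : (map.map pvKey).Nodup) :
    remove_pixel_from_map map pv R =
      map.filter (fun e =>
        (PySem.List.pyRange (-R) (R + 1) 1).all (fun bi =>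
          (PySem.List.pyRange (-R) (R + 1) 1).all (fun gi =>
            (PySem.List.pyRange (-R) (R + 1) 1).all (fun ri =>
              !(pvKey e == (pv.1 + bi, pv.2.1 + gi, pv.2.2 + ri)))))) := by
  simp only [remove_pixel_from_map]
  apply pvFoldl_filter_body _ _ _ _ map h
  intro m bi hm
  apply pvFoldl_filter_body _ _ _ _ m hm
  intro m' gi hm'
  apply pvFoldl_filter_body _ _ _ _ m' hm'
  intro m'' ri hm''
  exact pvStep_eq_filter m'' _ hm''

theorem pvB_eq_filter (map : List (Int × Int × Int × Int)) (pv : Int × Int × Int) (R : Int)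
    (h : (map.map pvKey).Nodup) :
    remove_pixel_from_map_alt map pv R =
      map.filter (fun e =>
        ((map.map pvKey).filter (pvCube pv.1 pv.2.1 pv.2.2 R)).all
          (fun k => !(pvKey e == k))) := by
  simp only [remove_pixel_from_map_alt]
  apply pvFoldl_filter_body _ _ _ _ map h
  intro m k hm
  exact pvDel_eq_filter m k hm

theorem pvPointwise (map : List (Int × Int × Int × Int)) (b g r R : Int)
    (e : Int × Int × Int × Int) (he : e ∈ map) :
    ((PySem.List.pyRange (-R) (R + 1) 1).all (fun bi =>
      (PySem.List.pyRange (-R) (R + 1) 1).all (fun gi =>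
        (PySem.List.pyRange (-R) (R + 1) 1).all (fun ri =>
          !(pvKey e == (b + bi, g + gi, r + ri))))))
    = (((map.map pvKey).filter (pvCube b g r R)).all (fun k => !(pvKey e == k))) := by
  rw [Bool.eq_iff_iff]
  simp only [List.all_eq_true, List.mem_filter, List.mem_map, PySem.List.mem_pyRange_one,
    Bool.not_eq_true', beq_eq_false_iff_ne, ne_eq, pvCube, Bool.and_eq_true,
    decide_eq_true_eq, abs_le]
  constructor
  · rintro hA k ⟨⟨e', he', rfl⟩, hc1, hc2, hc3⟩ hEq
    refine hA ((pvKey e').1 - b) ⟨by omega, by omega⟩ ((pvKey e').2.1 - g) ⟨by omega, by omega⟩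
      ((pvKey e').2.2 - r) ⟨by omega, by omega⟩ ?_
    rw [hEq]
    obtain ⟨a1, a2, a3⟩ := pvKey e'
    simp only [Prod.mk.injEq]
    omega
  · intro hB bi hbi gi hgi ri hri hEq
    refine hB (pvKey e) ⟨⟨e, he, rfl⟩, ?_⟩ rfl
    rw [hEq]
    dsimp only
    omega

-- ===== VERDICT (by name: the statement is the Claim_ definition above) =====
theorem remove_pixel_from_map_spec : Claim_equal_remove_pixel_from_map := by
  intro map pv R _ hpre
  unfold Spec_remove_pixel_from_map
  rw [pvA_eq_filter map pv R hpre, pvB_eq_filter map pv R hpre]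
  apply List.filter_congr
  intro e he
  exact pvPointwise map pv.1 pv.2.1 pv.2.2 R e he
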